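-- pv_equiv track=rewrite | github.com/aorursy/KT_dataset_py | alarehage_learn-python-challenge-day-7-exercises.py | blackjack_hand_greater_than
-- ===== SOURCE A (Python) =====
-- def blackjack_hand_greater_than(hand_1, hand_2):
--     """
--     Return True if hand_1 beats hand_2, and False otherwise.
--
--     In order for hand_1 to beat hand_2 the following must be true:
--     - The total of hand_1 must not exceed 21
--     - The total of hand_1 must exceed the total of hand_2 OR hand_2's total must exceed 21
--
--     Hands are represented as a list of cards. Each card is represented by a string.
--
--     When adding up a hand's total, cards with numbers count for that many points. Face
--     cards ('J', 'Q', and 'K') are worth 10 points. 'A' can count for 1 or 11.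
--
--     When determining a hand's total, you should try to count aces in the way that
--     maximizes the hand's total without going over 21. e.g. the total of ['A', 'A', '9'] is 21,
--     the total of ['A', 'A', '9', '3'] is 14.
--
--     Examples:
--     >>> blackjack_hand_greater_than(['K'], ['3', '4'])
--     True
--     >>> blackjack_hand_greater_than(['K'], ['10'])
--     False
--     >>> blackjack_hand_greater_than(['K', 'K', '2'], ['3'])
--     False
--     """
--     hand_1_score = 0
--     hand_2_score = 0
--     hand_1.sort()
--     hand_2.sort()
--     aces = 0
--
--     for card in hand_1:
--         if card == 'J' or card == 'Q' or card == 'K':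
--             hand_1_score += 10
--         elif card == 'A':
--             aces += 1
--         else:
--             hand_1_score += int(card)
--     while aces > 0:
--         if hand_1_score <= 10:
--             hand_1_score += 11
--         else:
--             hand_1_score += 1
--         aces -= 1
--     aces = 0
--     for card in hand_2:
--         if card == 'J' or card == 'Q' or card == 'K':
--             hand_2_score += 10
--         elif card == 'A':
--             aces += 1
--         else:
--             hand_2_score += int(card)
--     while aces > 0:
--         if hand_2_score <= 10:
--             hand_2_score += 11
--         else:
--             hand_2_score += 1
--         aces -= 1
--
--     return hand_1_score <= 21 and (hand_1_score > hand_2_score or hand_2_score > 21)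
-- ===== SOURCE B (Python) =====
-- def hand_total(hand):
--     # non-ace sum in one comprehension, aces counted separately; the per-ace
--     # while-loop is replaced by a closed form: k = number of aces counted as 11
--     # (A's rule: an ace adds 11 while the running score is still <= 10).
--     s = sum(10 if c in ('J', 'Q', 'K') else int(c) for c in hand if c != 'A')
--     a = hand.count('A')
--     k = 0 if s > 10 else min(a, (10 - s) // 11 + 1)
--     return s + 11 * k + (a - k)
--
--
-- def blackjack_hand_greater_than(hand_1, hand_2):
--     hand_1.sort()
--     hand_2.sort()
--     t1 = hand_total(hand_1)
--     t2 = hand_total(hand_2)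
--     return t1 <= 21 and (t1 > t2 or t2 > 21)
-- ===== Notes on version B (the rewrite author's own statement) =====
-- stated objective: simpler
-- what changed: The duplicated per-hand accumulator loop plus per-ace while-loop is replaced by a shared helper that sums non-ace cards in one comprehension, counts aces, and applies a closed-form ace adjustment (k aces count as 11, k = min(a,(10-s)//11+1) when s<=10) instead of looping over the aces.
import Mathlib
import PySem

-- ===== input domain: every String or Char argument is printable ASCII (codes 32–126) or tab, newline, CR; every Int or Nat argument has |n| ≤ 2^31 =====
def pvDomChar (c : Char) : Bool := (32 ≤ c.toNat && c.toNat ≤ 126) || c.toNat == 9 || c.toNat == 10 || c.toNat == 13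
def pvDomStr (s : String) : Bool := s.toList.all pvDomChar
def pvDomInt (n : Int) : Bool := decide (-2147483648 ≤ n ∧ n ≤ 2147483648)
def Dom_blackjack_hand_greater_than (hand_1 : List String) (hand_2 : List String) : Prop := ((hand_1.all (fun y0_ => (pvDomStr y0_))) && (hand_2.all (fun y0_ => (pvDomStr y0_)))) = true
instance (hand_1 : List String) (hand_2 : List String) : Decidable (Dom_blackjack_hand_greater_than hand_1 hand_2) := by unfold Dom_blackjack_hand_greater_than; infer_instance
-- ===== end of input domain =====

-- B replaces A's duplicated per-hand loop + per-ace while-loop by a shared helper with a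
-- closed-form ace adjustment (objective: simpler). Both Pythons sort the hands in place
-- (same side effect); the equivalence proved here is about the return value.

-- ===== PORT A =====
-- the for-loop over a hand: state (score, aces); none = int(card) raised ValueError
def pvScanA : List String → Int × Nat → Option (Int × Nat)
  | [], st => some st
  | card :: rest, (score, aces) =>
    if card = "J" ∨ card = "Q" ∨ card = "K" then pvScanA rest (score + 10, aces)
    else if card = "A" then pvScanA rest (score, aces + 1)
    else
      match PySem.Int.ofStr? card with
      | some v => pvScanA rest (score + v, aces)
      | none => none

-- the 'while aces > 0' loop
def pvAcesA : Nat → Int → Int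
  | 0, score => score
  | a + 1, score => pvAcesA a (if score ≤ 10 then score + 11 else score + 1)

def blackjack_hand_greater_than (hand_1 : List String) (hand_2 : List String) : Bool :=
  let h1 := PySem.List.sorted hand_1 (fun x => x) false
  let h2 := PySem.List.sorted hand_2 (fun x => x) false
  match pvScanA h1 (0, 0), pvScanA h2 (0, 0) with
  | some (s1, a1), some (s2, a2) =>
    let hand_1_score := pvAcesA a1 s1
    let hand_2_score := pvAcesA a2 s2
    decide (hand_1_score ≤ 21) && (decide (hand_1_score > hand_2_score) || decide (hand_2_score > 21))
  | _, _ => false  -- int(card) raised: outside Pre_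

-- ===== PORT B =====
-- 10 if c in ('J','Q','K') else int(c)
def pvCardVal? (c : String) : Option Int :=
  if c = "J" ∨ c = "Q" ∨ c = "K" then some 10 else PySem.Int.ofStr? c

-- sum(... for c in hand if c != 'A') after the filter
def pvSumVals? : List String → Option Int
  | [] => some 0
  | c :: rest => (pvCardVal? c).bind fun v => (pvSumVals? rest).map fun s => v + s

def pvHandTotal? (hand : List String) : Option Int :=
  (pvSumVals? (hand.filter (fun c => !(c == "A")))).map fun s =>
    let a : Int := (PySem.List.count hand "A" : Int)
    let k : Int := if s > 10 then 0 else min a (PySem.Int.floordiv (10 - s) 11 + 1)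
    s + 11 * k + (a - k)

def blackjack_hand_greater_than_alt (hand_1 : List String) (hand_2 : List String) : Bool :=
  let h1 := PySem.List.sorted hand_1 (fun x => x) false
  let h2 := PySem.List.sorted hand_2 (fun x => x) false
  (((pvHandTotal? h1).bind fun t1 => (pvHandTotal? h2).map fun t2 =>
      decide (t1 ≤ 21) && (decide (t1 > t2) || decide (t2 > 21))).getD false)
  -- none (= int(c) raised) is outside Pre_

-- ===== PRECONDITION & SPEC =====
-- a card on which int(card) does not raise in A (face card, ace, or int-parsable string)
def pvOkCard (c : String) : Prop :=
  c = "J" ∨ c = "Q" ∨ c = "K" ∨ c = "A" ∨ (PySem.Int.ofStr? c).isSome = true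

-- Pre_ excludes exactly the inputs where Python A raises ValueError in int(card)
def Pre_blackjack_hand_greater_than (hand_1 : List String) (hand_2 : List String) : Prop :=
  (∀ c ∈ hand_1, pvOkCard c) ∧ (∀ c ∈ hand_2, pvOkCard c)

instance (hand_1 : List String) (hand_2 : List String) : Decidable (Pre_blackjack_hand_greater_than hand_1 hand_2) := by
  unfold Pre_blackjack_hand_greater_than pvOkCard; infer_instance

def pvWitness_blackjack_hand_greater_than : List String × List String := (["K"], ["3", "4"])

def Spec_blackjack_hand_greater_than (hand_1 : List String) (hand_2 : List String) (out : Bool) : Prop := out = blackjack_hand_greater_than_alt hand_1 hand_2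
instance (hand_1 : List String) (hand_2 : List String) (out : Bool) : Decidable (Spec_blackjack_hand_greater_than hand_1 hand_2 out) := by unfold Spec_blackjack_hand_greater_than; infer_instance

-- ===== CLAIM (what is proved, stated in full; the proofs are below) =====
def Claim_equal_blackjack_hand_greater_than : Prop := ∀ (hand_1 : List String) (hand_2 : List String), Dom_blackjack_hand_greater_than hand_1 hand_2 → Pre_blackjack_hand_greater_than hand_1 hand_2 → Spec_blackjack_hand_greater_than hand_1 hand_2 (blackjack_hand_greater_than hand_1 hand_2)

-- ===== LEMMAS AND PROOFS =====

-- A's for-loop over an all-ok list computes B's non-ace sum plus the ace count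
theorem pvScanA_eq (l : List String) : ∀ (s0 : Int) (a0 : Nat), (∀ c ∈ l, pvOkCard c) →
    ∃ s, pvSumVals? (l.filter (fun c => !(c == "A"))) = some s ∧
      pvScanA l (s0, a0) = some (s0 + s, a0 + l.count "A") := by
  induction l with
  | nil => intro s0 a0 _; exact ⟨0, rfl, by simp [pvScanA]⟩
  | cons c rest ih =>
    intro s0 a0 hok
    have hokr : ∀ x ∈ rest, pvOkCard x := fun x hx => hok x (List.mem_cons_of_mem _ hx)
    by_cases hJQK : c = "J" ∨ c = "Q" ∨ c = "K"
    · have hcA : ¬ (c = "A") := by rcases hJQK with h | h | h <;> simp [h]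
      obtain ⟨s, hs, hscan⟩ := ih (s0 + 10) a0 hokr
      refine ⟨10 + s, ?_, ?_⟩
      · simp [hcA, pvSumVals?, pvCardVal?, hJQK, hs]
      · simp [pvScanA, hJQK, hscan, hcA]
        omega
    · by_cases hcA : c = "A"
      · obtain ⟨s, hs, hscan⟩ := ih s0 (a0 + 1) hokr
        refine ⟨s, ?_, ?_⟩
        · simp [hcA, hs]
        · simp [pvScanA, hcA, hscan]; omega
      · have hv : (PySem.Int.ofStr? c).isSome = true := by
          rcases hok c List.mem_cons_self with h | h | h | h | h
          · exact absurd (Or.inl h) hJQK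
          · exact absurd (Or.inr (Or.inl h)) hJQK
          · exact absurd (Or.inr (Or.inr h)) hJQK
          · exact absurd h hcA
          · exact h
        obtain ⟨v, hveq⟩ := Option.isSome_iff_exists.mp hv
        obtain ⟨s, hs, hscan⟩ := ih (s0 + v) a0 hokr
        refine ⟨v + s, ?_, ?_⟩
        · simp [hcA, pvSumVals?, pvCardVal?, hJQK, hveq, hs]
        · simp [pvScanA, hJQK, hcA, hveq, hscan]
          omega

-- the while-loop with a score already above 10 just adds 1 per ace
theorem pvAcesA_gt (a : Nat) : ∀ (s : Int), 10 < s → pvAcesA a s = s + a := by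
  induction a with
  | zero => intro s _; simp [pvAcesA]
  | succ n ih =>
    intro s hs
    simp only [pvAcesA, if_neg (by omega : ¬ s ≤ 10)]
    rw [ih (s + 1) (by omega)]
    push_cast; ring

-- closed form of the while-loop
theorem pvAcesA_closed (a : Nat) : ∀ (s : Int),
    pvAcesA a s = s + 11 * (if s > 10 then 0 else min (a : Int) ((10 - s) / 11 + 1))
      + ((a : Int) - (if s > 10 then 0 else min (a : Int) ((10 - s) / 11 + 1))) := by
  induction a with
  | zero => intro s; simp only [pvAcesA]; split_ifs <;> omega
  | succ n ih =>
    intro s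
    by_cases hs : s ≤ 10
    · simp only [pvAcesA, if_pos hs]
      rw [ih (s + 11)]
      split_ifs <;> push_cast <;> omega
    · simp only [pvAcesA, if_neg hs]
      rw [pvAcesA_gt n (s + 1) (by omega)]
      split_ifs <;> push_cast <;> omega

-- B's per-hand total equals A's scan + ace loop, when every card is ok
theorem pvHandTotal_eq (l : List String) (hok : ∀ c ∈ l, pvOkCard c) :
    ∃ s a, pvScanA l (0, 0) = some (s, a) ∧ pvHandTotal? l = some (pvAcesA a s) := by
  obtain ⟨s, hs, hscan⟩ := pvScanA_eq l 0 0 hok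
  refine ⟨0 + s, 0 + l.count "A", hscan, ?_⟩
  simp only [pvHandTotal?, hs, Option.map_some, PySem.List.count_eq,
    PySem.Int.floordiv_eq_ediv_of_pos (by norm_num : (0:Int) < 11)]
  rw [pvAcesA_closed]
  simp only [Nat.zero_add, Int.zero_add]

theorem blackjack_hand_greater_than_spec : Claim_equal_blackjack_hand_greater_than := by
  intro hand_1 hand_2 _ hpre
  obtain ⟨h1ok, h2ok⟩ := hpre
  have h1ok' : ∀ c ∈ PySem.List.sorted hand_1 (fun x => x) false, pvOkCard c := by
    intro c hc; exact h1ok c ((PySem.List.mem_sorted _ _ _ _).mp hc)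
  have h2ok' : ∀ c ∈ PySem.List.sorted hand_2 (fun x => x) false, pvOkCard c := by
    intro c hc; exact h2ok c ((PySem.List.mem_sorted _ _ _ _).mp hc)
  obtain ⟨s1, a1, hscan1, htot1⟩ := pvHandTotal_eq _ h1ok'
  obtain ⟨s2, a2, hscan2, htot2⟩ := pvHandTotal_eq _ h2ok'
  unfold Spec_blackjack_hand_greater_than blackjack_hand_greater_than blackjack_hand_greater_than_alt
  simp only [hscan1, hscan2, htot1, htot2, Option.bind_some, Option.map_some, Option.getD_some]
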